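-- pv_equiv track=rewrite | github.com/keithhenning/technical-interviews | python/06_123.py | array_mutation
-- ===== SOURCE A (Python) =====
-- def array_mutation(n, a):
--     b = [0] * n
--
--     for i in range(n):
--         # Left neighbor (or 0 if out of bounds)
--         left = a[i-1] if i > 0 else 0
--
--         # Current element
--         current = a[i]
--
--         # Right neighbor (or 0 if out of bounds)
--         right = a[i+1] if i < n-1 else 0
--
--         # Sum all three values
--         b[i] = left + current + right
--
--     return b
-- ===== SOURCE B (Python) =====
-- def array_mutation(n, a):
--     # Prefix-sum re-implementation: p[k] = a[0]+...+a[k-1]; each output is a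
--     # difference of two prefix sums over the clamped window [i-1, i+1].
--     p = [0]
--     for k in range(n):
--         p.append(p[-1] + a[k])
--     return [p[min(i + 2, n)] - p[max(i - 1, 0)] for i in range(n)]
-- ===== Notes on version B (the rewrite author's own statement) =====
-- stated objective: alternative
-- what changed: Replaces the three per-index neighbor reads with a prefix-sum table built in one pass; each output element becomes a difference of two prefix sums over the clamped window.
import Mathlib
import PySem

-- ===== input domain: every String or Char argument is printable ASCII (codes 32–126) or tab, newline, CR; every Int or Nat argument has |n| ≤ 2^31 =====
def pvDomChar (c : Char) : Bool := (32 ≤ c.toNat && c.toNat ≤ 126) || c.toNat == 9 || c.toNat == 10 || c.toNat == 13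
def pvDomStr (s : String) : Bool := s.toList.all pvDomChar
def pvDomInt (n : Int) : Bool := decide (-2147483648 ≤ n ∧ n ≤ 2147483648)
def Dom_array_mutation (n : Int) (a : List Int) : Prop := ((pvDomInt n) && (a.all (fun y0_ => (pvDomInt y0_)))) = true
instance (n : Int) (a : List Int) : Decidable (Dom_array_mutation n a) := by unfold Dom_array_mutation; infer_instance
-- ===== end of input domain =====

-- B replaces the three neighbor reads per index with a prefix-sum table and two lookups (alternative decomposition, same cost).

-- ===== PORT A =====
def array_mutation (n : Int) (a : List Int) : List Int :=
  let b := List.replicate n.toNat 0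
  (PySem.List.pyRange 0 n 1).foldl (fun b i =>
    let left := if 0 < i then PySem.List.pyGetD a (i - 1) 0 else 0
    let current := PySem.List.pyGetD a i 0
    let right := if i < n - 1 then PySem.List.pyGetD a (i + 1) 0 else 0
    PySem.List.pySetD b i (left + current + right)) b

-- ===== PORT B =====
def array_mutation_alt (n : Int) (a : List Int) : List Int :=
  let p := (PySem.List.pyRange 0 n 1).foldl
    (fun p k => p ++ [PySem.List.pyGetD p (-1) 0 + PySem.List.pyGetD a k 0]) [0]
  (PySem.List.pyRange 0 n 1).map
    (fun i => PySem.List.pyGetD p (min (i + 2) n) 0 - PySem.List.pyGetD p (max (i - 1) 0) 0)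

-- ===== PRECONDITION & SPEC =====
-- Pre_ excludes exactly the inputs with n > len(a), on which the Python A raises IndexError (B raises there too).
def Pre_array_mutation (n : Int) (a : List Int) : Prop := n ≤ (a.length : Int)
instance (n : Int) (a : List Int) : Decidable (Pre_array_mutation n a) := by unfold Pre_array_mutation; infer_instance
def pvWitness_array_mutation : Int × List Int := (3, [1, 2, 3])

def Spec_array_mutation (n : Int) (a : List Int) (out : List Int) : Prop := out = array_mutation_alt n a
instance (n : Int) (a : List Int) (out : List Int) : Decidable (Spec_array_mutation n a out) := by unfold Spec_array_mutation; infer_instance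

-- ===== CLAIM (what is proved, stated in full; the proofs are below) =====
def Claim_equal_array_mutation : Prop := ∀ (n : Int) (a : List Int), Dom_array_mutation n a → Pre_array_mutation n a → Spec_array_mutation n a (array_mutation n a)

-- ===== LEMMAS AND PROOFS =====

-- prefix sum of the first k elements
def pvS (a : List Int) (k : Nat) : Int := (a.take k).sum

lemma pvS_succ (a : List Int) (k : Nat) (hk : k < a.length) :
    pvS a (k + 1) = pvS a k + a.getD k 0 := by
  rw [pvS, pvS, List.sum_take_succ a k hk, List.getD_eq_getElem a 0 hk]

-- B's prefix fold builds the table of prefix sums.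
lemma alt_prefix (a : List Int) (m : Nat) (hm : m ≤ a.length) :
    (PySem.List.pyRange 0 (m : Int) 1).foldl
      (fun p k => p ++ [PySem.List.pyGetD p (-1) 0 + PySem.List.pyGetD a k 0]) [0]
    = (List.range (m + 1)).map (pvS a) := by
  induction m with
  | zero => simp [pvS]
  | succ k ih =>
    have hsplit : PySem.List.pyRange 0 ((k + 1 : Nat) : Int) 1
        = PySem.List.pyRange 0 (k : Int) 1 ++ [(k : Int)] := by
      push_cast
      exact PySem.List.pyRange_one_succ_right (Int.natCast_nonneg k)
    rw [hsplit, List.foldl_append, ih (by omega)]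
    have hlast : PySem.List.pyGetD ((List.range (k + 1)).map (pvS a)) (-1) 0 = pvS a k := by
      rw [List.range_succ, List.map_append, List.map_singleton]
      exact PySem.List.pyGetD_neg_one_append_singleton _ _ _
    simp only [List.foldl_cons, List.foldl_nil, hlast, PySem.List.pyGetD_natCast]
    rw [List.range_succ (n := k + 1), List.map_append, List.map_singleton,
      pvS_succ a k (by omega)]

-- A's fold of in-place sets over range(k) fills the first k slots with h.
lemma set_fold (h : Int → Int) (m : Nat) :
    ∀ (k : Nat), k ≤ m → ∀ (b : List Int), b.length = m →
      (PySem.List.pyRange 0 (k : Int) 1).foldl (fun b i => PySem.List.pySetD b i (h i)) b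
      = (PySem.List.pyRange 0 (k : Int) 1).map h ++ b.drop k := by
  intro k
  induction k with
  | zero => intro _ b _; simp
  | succ k ih =>
    intro hk b hb
    have hsplit : PySem.List.pyRange 0 ((k + 1 : Nat) : Int) 1
        = PySem.List.pyRange 0 (k : Int) 1 ++ [(k : Int)] := by
      push_cast
      exact PySem.List.pyRange_one_succ_right (Int.natCast_nonneg k)
    rw [hsplit, List.foldl_append, ih (by omega) b hb]
    simp only [List.foldl_cons, List.foldl_nil, PySem.List.pySetD_natCast, List.map_append,
      List.map_singleton]
    have hlen : ((PySem.List.pyRange 0 (k : Int) 1).map h).length = k := by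
      simp [PySem.List.length_pyRange_one]
    rw [List.set_append_right _ _ hlen.le, hlen, Nat.sub_self,
      List.drop_eq_getElem_cons (by omega), List.set_cons_zero]
    simp

-- indexing the prefix table
lemma get_prefix (a : List Int) (m : Nat) (j : Int) (h0 : 0 ≤ j) (h1 : j ≤ (m : Int)) :
    PySem.List.pyGetD ((List.range (m + 1)).map (pvS a)) j 0 = pvS a j.toNat := by
  rw [PySem.List.pyGetD_eq_getElem _ 0 h0 (by simp; omega)]
  simp

-- pointwise: prefix-sum difference equals the window sum A computes
lemma window_eq (a : List Int) (m : Nat) (hm : m ≤ a.length) (i : Int)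
    (h0 : 0 ≤ i) (h1 : i < (m : Int)) :
    pvS a (min (i + 2) (m : Int)).toNat - pvS a (max (i - 1) 0).toNat
      = (if 0 < i then PySem.List.pyGetD a (i - 1) 0 else 0) + PySem.List.pyGetD a i 0 +
          (if i < (m : Int) - 1 then PySem.List.pyGetD a (i + 1) 0 else 0) := by
  lift i to Nat using h0 with t
  have htm : t < m := by omega
  have gmid : PySem.List.pyGetD a (t : Int) 0 = a.getD t 0 := PySem.List.pyGetD_natCast a t 0
  by_cases hpos : (0 : Int) < (t : Int)
  · have gleft : PySem.List.pyGetD a ((t : Int) - 1) 0 = a.getD (t - 1) 0 := by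
      rw [show (t : Int) - 1 = ((t - 1 : Nat) : Int) by omega]
      exact PySem.List.pyGetD_natCast a (t - 1) 0
    have hlo : pvS a t = pvS a (t - 1) + a.getD (t - 1) 0 := by
      have := pvS_succ a (t - 1) (by omega)
      rwa [show t - 1 + 1 = t by omega] at this
    by_cases hlt : (t : Int) < (m : Int) - 1
    · have gright : PySem.List.pyGetD a ((t : Int) + 1) 0 = a.getD (t + 1) 0 := by
        rw [show (t : Int) + 1 = ((t + 1 : Nat) : Int) by omega]
        exact PySem.List.pyGetD_natCast a (t + 1) 0
      rw [if_pos hpos, if_pos hlt, gleft, gmid, gright,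
        show (min ((t : Int) + 2) (m : Int)).toNat = t + 1 + 1 by omega,
        show (max ((t : Int) - 1) 0).toNat = t - 1 by omega,
        pvS_succ a (t + 1) (by omega), pvS_succ a t (by omega), hlo]
      ring
    · rw [if_pos hpos, if_neg hlt, gleft, gmid,
        show (min ((t : Int) + 2) (m : Int)).toNat = t + 1 by omega,
        show (max ((t : Int) - 1) 0).toNat = t - 1 by omega,
        pvS_succ a t (by omega), hlo]
      ring
  · have ht0 : t = 0 := by omega
    subst ht0
    by_cases hlt : ((0 : Nat) : Int) < (m : Int) - 1
    · have gright : PySem.List.pyGetD a (((0 : Nat) : Int) + 1) 0 = a.getD 1 0 := by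
        rw [show ((0 : Nat) : Int) + 1 = ((1 : Nat) : Int) by omega]
        exact PySem.List.pyGetD_natCast a 1 0
      rw [if_neg hpos, if_pos hlt, gmid, gright,
        show (min (((0 : Nat) : Int) + 2) (m : Int)).toNat = 0 + 1 + 1 by omega,
        show (max (((0 : Nat) : Int) - 1) 0).toNat = 0 by omega,
        pvS_succ a (0 + 1) (by omega), pvS_succ a 0 (by omega)]
      simp [pvS]
    · rw [if_neg hpos, if_neg hlt, gmid,
        show (min (((0 : Nat) : Int) + 2) (m : Int)).toNat = 0 + 1 by omega,
        show (max (((0 : Nat) : Int) - 1) 0).toNat = 0 by omega,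
        pvS_succ a 0 (by omega)]
      simp [pvS]

-- ===== VERDICT (by name: the statement is the Claim_ definition above) =====
theorem array_mutation_spec : Claim_equal_array_mutation := by
  intro n a _ hpre
  have hpre' : n ≤ (a.length : Int) := hpre
  simp only [Spec_array_mutation, array_mutation, array_mutation_alt]
  by_cases hn : n ≤ 0
  · have h1 : PySem.List.pyRange 0 n 1 = [] := PySem.List.pyRange_one_eq_nil (by omega)
    have h2 : n.toNat = 0 := by omega
    simp [h1, h2]
  · have hm : n = (n.toNat : Int) := by omega
    set m := n.toNat with hmdef
    have hml : m ≤ a.length := by omega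
    rw [hm, alt_prefix a m hml,
      set_fold (fun i =>
        (if 0 < i then PySem.List.pyGetD a (i - 1) 0 else 0) + PySem.List.pyGetD a i 0 +
          (if i < (m : Int) - 1 then PySem.List.pyGetD a (i + 1) 0 else 0)) m m le_rfl
        (List.replicate m 0) (by simp)]
    rw [List.drop_eq_nil_of_le (by simp), List.append_nil]
    apply List.map_congr_left
    intro i hi
    rw [PySem.List.mem_pyRange_one] at hi
    rw [get_prefix a m _ (by omega) (by omega), get_prefix a m _ (by omega) (by omega)]
    exact (window_eq a m hml i hi.1 hi.2).symm
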